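-- pv_equiv track=rewrite | github.com/neotherack/Advent-of-Code | 2020/Day11/Part II/day11_partII.py | get_seat_map_stats
-- ===== SOURCE A (Python) =====
-- def get_seat_map_stats(seat_map):
--     free = 0
--     occupy = 0
--     space = 0
--
--     for row in seat_map:
--         for seat in row:
--             if seat=="L":
--                 free=free+1
--             elif seat=="#":
--                 occupy=occupy+1
--             else:
--                 space=space+1
--     return occupy, free, space
-- ===== SOURCE B (Python) =====
-- from bisect import bisect_left, bisect_right
--
--
-- def get_seat_map_stats(seat_map):
--     flat = sorted(seat for row in seat_map for seat in row)
--     occupy = bisect_right(flat, '#') - bisect_left(flat, '#')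
--     free = bisect_right(flat, 'L') - bisect_left(flat, 'L')
--     return occupy, free, len(flat) - occupy - free
-- ===== Notes on version B (the rewrite author's own statement) =====
-- stated objective: alternative
-- what changed: Instead of a nested loop with three branch counters, B sorts the flattened seat list and counts '#' and 'L' as bisect_right-bisect_left windows in the sorted order, deriving the catch-all 'space' count by subtraction from the total length.
import Mathlib
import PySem

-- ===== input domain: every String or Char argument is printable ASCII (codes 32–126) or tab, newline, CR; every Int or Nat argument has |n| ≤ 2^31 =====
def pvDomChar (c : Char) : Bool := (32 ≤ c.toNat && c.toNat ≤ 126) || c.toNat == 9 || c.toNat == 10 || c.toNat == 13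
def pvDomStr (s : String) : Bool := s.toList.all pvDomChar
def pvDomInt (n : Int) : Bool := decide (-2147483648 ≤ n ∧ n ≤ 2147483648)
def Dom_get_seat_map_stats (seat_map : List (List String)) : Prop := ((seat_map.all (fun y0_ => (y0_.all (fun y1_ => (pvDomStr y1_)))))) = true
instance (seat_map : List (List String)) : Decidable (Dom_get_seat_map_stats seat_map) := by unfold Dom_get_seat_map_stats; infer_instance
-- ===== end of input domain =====

-- B sorts the flattened seat list and counts '#' and 'L' by binary search (bisect windows), deriving 'space' by subtraction (objective: alternative; not faster).


-- ===== PORT A =====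
-- A: nested foldl keeping (free, occupy, space) counters, branching per seat as the Python does.
def get_seat_map_stats (seat_map : List (List String)) : Int × Int × Int :=
  let st := seat_map.foldl (fun st row =>
    row.foldl (fun st seat =>
      let (free, occupy, space) := st
      if seat = "L" then (free + 1, occupy, space)
      else if seat = "#" then (free, occupy + 1, space)
      else (free, occupy, space + 1)) st) ((0 : Int), (0 : Int), (0 : Int))
  (st.2.1, st.1, st.2.2)

-- ===== PORT B =====
-- B: sort the flattened seats, count "#" and "L" as bisect_right - bisect_left windows, space by subtraction.
def get_seat_map_stats_alt (seat_map : List (List String)) : Int × Int × Int :=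
  let flat := PySem.List.sorted (seat_map.flatMap (fun row => row)) (fun seat => seat)
  let occupy : Int := (PySem.List.bisectRight flat "#" : Int) - (PySem.List.bisectLeft flat "#" : Int)
  let free : Int := (PySem.List.bisectRight flat "L" : Int) - (PySem.List.bisectLeft flat "L" : Int)
  (occupy, free, (flat.length : Int) - occupy - free)

-- ===== PRECONDITION & SPEC =====
def Spec_get_seat_map_stats (seat_map : List (List String)) (out : Int × Int × Int) : Prop := out = get_seat_map_stats_alt seat_map
instance (seat_map : List (List String)) (out : Int × Int × Int) : Decidable (Spec_get_seat_map_stats seat_map out) := by unfold Spec_get_seat_map_stats; infer_instance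

-- ===== CLAIM (what is proved, stated in full; the proofs are below) =====
def Claim_equal_get_seat_map_stats : Prop := ∀ (seat_map : List (List String)), Dom_get_seat_map_stats seat_map → Spec_get_seat_map_stats seat_map (get_seat_map_stats seat_map)

-- ===== LEMMAS AND PROOFS =====

-- Loop invariant: A's fold over one row, started at (f,o,s), adds the row's counts of "L", "#", others.
theorem rowA_eq (row : List String) (f o s : Int) :
    row.foldl (fun st seat =>
      let (free, occupy, space) := st
      if seat = "L" then (free + 1, occupy, space)
      else if seat = "#" then (free, occupy + 1, space)
      else (free, occupy, space + 1)) (f, o, s)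
    = (f + (row.count "L" : Int), o + (row.count "#" : Int),
       s + ((row.length : Int) - (row.count "L" : Int) - (row.count "#" : Int))) := by
  induction row generalizing f o s with
  | nil => simp
  | cons x xs ih =>
    simp only [List.foldl_cons, List.count_cons, List.length_cons]
    by_cases hL : x = "L"
    · subst hL
      rw [if_pos rfl, ih]
      simp [Prod.ext_iff]
      omega
    · by_cases hH : x = "#"
      · subst hH
        rw [if_neg (by decide), if_pos rfl, ih]
        simp [Prod.ext_iff]
        omega
      · rw [if_neg hL, if_neg hH, ih]
        simp [Prod.ext_iff, hL, hH]
        omega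

theorem outerA_eq (rows : List (List String)) (f o s : Int) :
    rows.foldl (fun st row =>
      row.foldl (fun st seat =>
        let (free, occupy, space) := st
        if seat = "L" then (free + 1, occupy, space)
        else if seat = "#" then (free, occupy + 1, space)
        else (free, occupy, space + 1)) st) (f, o, s)
    = (f + (rows.flatten.count "L" : Int), o + (rows.flatten.count "#" : Int),
       s + ((rows.flatten.length : Int) - (rows.flatten.count "L" : Int) - (rows.flatten.count "#" : Int))) := by
  induction rows generalizing f o s with
  | nil => simp
  | cons r rs ih =>
    simp only [List.foldl_cons, rowA_eq, ih, List.flatten_cons, List.count_append,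
      List.length_append, Prod.ext_iff]
    push_cast
    refine ⟨by ring, by ring, by ring⟩

-- bisect loop specs for String (PySem states them only for Int; same induction, any linear order)
theorem bisectLeftLoop_spec_str (xs : List String) (x : String)
    (hs : List.Pairwise (fun a b => a ≤ b) xs) :
    ∀ (fuel lo hi : ℕ), lo ≤ hi → hi ≤ xs.length → hi - lo ≤ fuel →
      (∀ (j : ℕ) (hj : j < xs.length), j < lo → xs[j] < x) →
      (∀ (j : ℕ) (hj : j < xs.length), hi ≤ j → x ≤ xs[j]) →
      lo ≤ PySem.List.bisectLeftLoop xs x fuel lo hi ∧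
      PySem.List.bisectLeftLoop xs x fuel lo hi ≤ hi ∧
      (∀ (j : ℕ) (hj : j < xs.length), j < PySem.List.bisectLeftLoop xs x fuel lo hi → xs[j] < x) ∧
      (∀ (j : ℕ) (hj : j < xs.length), PySem.List.bisectLeftLoop xs x fuel lo hi ≤ j → x ≤ xs[j]) := by
  have hpw := List.pairwise_iff_getElem.mp hs
  intro fuel
  induction fuel with
  | zero =>
    intro lo hi h1 h2 h3 hlo hhi
    have : lo = hi := by omega
    subst this
    simp only [PySem.List.bisectLeftLoop]
    exact ⟨le_rfl, le_rfl, fun j hj hlt => hlo j hj hlt, fun j hj hge => hhi j hj hge⟩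
  | succ n ih =>
    intro lo hi h1 h2 h3 hlo hhi
    by_cases hlt : lo < hi
    · have hmid : (lo + hi) / 2 < xs.length := by omega
      have heq : PySem.List.bisectLeftLoop xs x (n + 1) lo hi =
          if xs[(lo + hi) / 2] < x then PySem.List.bisectLeftLoop xs x n ((lo + hi) / 2 + 1) hi
          else PySem.List.bisectLeftLoop xs x n lo ((lo + hi) / 2) := by
        rw [PySem.List.bisectLeftLoop.eq_2, if_pos hlt, List.getElem?_eq_getElem hmid]
      rw [heq]
      by_cases hy : xs[(lo + hi) / 2] < x
      · rw [if_pos hy]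
        have h := ih ((lo + hi) / 2 + 1) hi (by omega) h2 (by omega)
          (fun j hj hjlt => by
            rcases Nat.lt_or_ge j ((lo + hi) / 2) with hc | hc
            · exact lt_of_le_of_lt (hpw j ((lo + hi) / 2) hj hmid hc) hy
            · have : j = (lo + hi) / 2 := by omega
              subst this; exact hy)
          hhi
        exact ⟨le_trans (by omega) h.1, h.2.1, h.2.2.1, h.2.2.2⟩
      · rw [if_neg hy]
        have hy' : x ≤ xs[(lo + hi) / 2] := le_of_not_gt hy
        have h := ih lo ((lo + hi) / 2) (by omega) (by omega) (by omega) hlo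
          (fun j hj hjge => by
            rcases Nat.lt_or_ge ((lo + hi) / 2) j with hc | hc
            · exact le_trans hy' (hpw ((lo + hi) / 2) j hmid hj hc)
            · have : j = (lo + hi) / 2 := by omega
              subst this; exact hy')
        exact ⟨h.1, le_trans h.2.1 (by omega), h.2.2.1, h.2.2.2⟩
    · have : lo = hi := by omega
      subst this
      rw [PySem.List.bisectLeftLoop.eq_2, if_neg hlt]
      exact ⟨le_rfl, le_rfl, fun j hj hjl => hlo j hj hjl, fun j hj hge => hhi j hj hge⟩

theorem bisectRightLoop_spec_str (xs : List String) (x : String)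
    (hs : List.Pairwise (fun a b => a ≤ b) xs) :
    ∀ (fuel lo hi : ℕ), lo ≤ hi → hi ≤ xs.length → hi - lo ≤ fuel →
      (∀ (j : ℕ) (hj : j < xs.length), j < lo → xs[j] ≤ x) →
      (∀ (j : ℕ) (hj : j < xs.length), hi ≤ j → x < xs[j]) →
      lo ≤ PySem.List.bisectRightLoop xs x fuel lo hi ∧
      PySem.List.bisectRightLoop xs x fuel lo hi ≤ hi ∧
      (∀ (j : ℕ) (hj : j < xs.length), j < PySem.List.bisectRightLoop xs x fuel lo hi → xs[j] ≤ x) ∧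
      (∀ (j : ℕ) (hj : j < xs.length), PySem.List.bisectRightLoop xs x fuel lo hi ≤ j → x < xs[j]) := by
  have hpw := List.pairwise_iff_getElem.mp hs
  intro fuel
  induction fuel with
  | zero =>
    intro lo hi h1 h2 h3 hlo hhi
    have : lo = hi := by omega
    subst this
    simp only [PySem.List.bisectRightLoop]
    exact ⟨le_rfl, le_rfl, fun j hj hlt => hlo j hj hlt, fun j hj hge => hhi j hj hge⟩
  | succ n ih =>
    intro lo hi h1 h2 h3 hlo hhi
    by_cases hlt : lo < hi
    · have hmid : (lo + hi) / 2 < xs.length := by omega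
      have heq : PySem.List.bisectRightLoop xs x (n + 1) lo hi =
          if x < xs[(lo + hi) / 2] then PySem.List.bisectRightLoop xs x n lo ((lo + hi) / 2)
          else PySem.List.bisectRightLoop xs x n ((lo + hi) / 2 + 1) hi := by
        rw [PySem.List.bisectRightLoop.eq_2, if_pos hlt, List.getElem?_eq_getElem hmid]
      rw [heq]
      by_cases hy : x < xs[(lo + hi) / 2]
      · rw [if_pos hy]
        have h := ih lo ((lo + hi) / 2) (by omega) (by omega) (by omega) hlo
          (fun j hj hjge => by
            rcases Nat.lt_or_ge ((lo + hi) / 2) j with hc | hc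
            · exact lt_of_lt_of_le hy (hpw ((lo + hi) / 2) j hmid hj hc)
            · have : j = (lo + hi) / 2 := by omega
              subst this; exact hy)
        exact ⟨h.1, le_trans h.2.1 (by omega), h.2.2.1, h.2.2.2⟩
      · rw [if_neg hy]
        have hy' : xs[(lo + hi) / 2] ≤ x := le_of_not_gt hy
        have h := ih ((lo + hi) / 2 + 1) hi (by omega) h2 (by omega)
          (fun j hj hjlt => by
            rcases Nat.lt_or_ge j ((lo + hi) / 2) with hc | hc
            · exact le_trans (hpw j ((lo + hi) / 2) hj hmid hc) hy'
            · have : j = (lo + hi) / 2 := by omega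
              subst this; exact hy')
          hhi
        exact ⟨le_trans (by omega) h.1, h.2.1, h.2.2.1, h.2.2.2⟩
    · have : lo = hi := by omega
      subst this
      rw [PySem.List.bisectRightLoop.eq_2, if_neg hlt]
      exact ⟨le_rfl, le_rfl, fun j hj hjl => hlo j hj hjl, fun j hj hge => hhi j hj hge⟩

theorem countP_window {α : Type} (xs : List α) (p : α → Bool) (L R : ℕ)
    (hLR : L ≤ R) (hR : R ≤ xs.length)
    (h : ∀ (j : ℕ) (hj : j < xs.length), p xs[j] = true ↔ (L ≤ j ∧ j < R)) :
    xs.countP p = R - L := by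
  have hdr : xs.drop R = (xs.drop L).drop (R - L) := by
    rw [List.drop_drop]
    congr 1
    omega
  have hsplit : xs = xs.take L ++ ((xs.drop L).take (R - L) ++ xs.drop R) := by
    rw [hdr, List.take_append_drop, List.take_append_drop]
  calc xs.countP p = (xs.take L).countP p + (((xs.drop L).take (R - L)).countP p + (xs.drop R).countP p) := by
        rw [← List.countP_append, ← List.countP_append, ← hsplit]
    _ = 0 + ((R - L) + 0) := by
        congr 1
        · rw [List.countP_eq_zero]
          intro a ha
          obtain ⟨i, hi, rfl⟩ := List.mem_iff_getElem.mp ha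
          have hiL : i < L := by simpa using (List.length_take_le L xs).trans_lt' hi
          rw [List.getElem_take]
          have hilen : i < xs.length := by
            have := hi; simp [List.length_take] at this; omega
          intro hp
          have := (h i hilen).mp hp
          omega
        · congr 1
          · rw [List.countP_eq_length.mpr]
            · simp [List.length_take, List.length_drop]; omega
            · intro a ha
              obtain ⟨i, hi, rfl⟩ := List.mem_iff_getElem.mp ha
              rw [List.getElem_take, List.getElem_drop]
              have hib : i < R - L := by
                have := hi; simp [List.length_take] at this; omega
              have hilen : L + i < xs.length := by omega
              exact (h (L + i) hilen).mpr ⟨by omega, by omega⟩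
          · rw [List.countP_eq_zero]
            intro a ha
            obtain ⟨i, hi, rfl⟩ := List.mem_iff_getElem.mp ha
            rw [List.getElem_drop]
            have hilen : R + i < xs.length := by
              have := hi; simp [List.length_drop] at this; omega
            intro hp
            have := (h (R + i) hilen).mp hp
            omega
    _ = R - L := by omega

theorem bisect_window_count (xs : List String) (x : String)
    (hs : List.Pairwise (fun a b => a ≤ b) xs) :
    ((PySem.List.bisectRight xs x : Int) - (PySem.List.bisectLeft xs x : Int)) = (xs.count x : Int) := by
  have hL := bisectLeftLoop_spec_str xs x hs xs.length 0 xs.length (Nat.zero_le _) le_rfl (by omega)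
    (fun j hj hjl => absurd hjl (by omega)) (fun j hj hge => absurd hj (by omega))
  have hR := bisectRightLoop_spec_str xs x hs xs.length 0 xs.length (Nat.zero_le _) le_rfl (by omega)
    (fun j hj hjl => absurd hjl (by omega)) (fun j hj hge => absurd hj (by omega))
  have hLdef : PySem.List.bisectLeft xs x = PySem.List.bisectLeftLoop xs x xs.length 0 xs.length := rfl
  have hRdef : PySem.List.bisectRight xs x = PySem.List.bisectRightLoop xs x xs.length 0 xs.length := rfl
  rw [← hLdef] at hL
  rw [← hRdef] at hR
  obtain ⟨-, hLle, hLlt, hLge⟩ := hL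
  obtain ⟨-, hRle, hRlt, hRge⟩ := hR
  set L := PySem.List.bisectLeft xs x with hLs
  set R := PySem.List.bisectRight xs x with hRs
  have hLR : L ≤ R := by
    by_contra hc
    rw [not_le] at hc
    have hRlen : R < xs.length := lt_of_lt_of_le hc hLle
    exact absurd (hLlt R hRlen hc) (not_lt_of_ge (le_of_lt (hRge R hRlen le_rfl)))
  have hcount : xs.count x = R - L := by
    rw [List.count, countP_window xs _ L R hLR hRle]
    intro j hj
    constructor
    · intro hp
      have heq : xs[j] = x := by simpa using hp
      constructor
      · by_contra hc
        rw [not_le] at hc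
        exact absurd (hLlt j hj hc) (by simp [heq])
      · by_contra hc
        rw [not_lt] at hc
        exact absurd (hRge j hj hc) (by simp [heq])
    · rintro ⟨h1, h2⟩
      have := le_antisymm (hRlt j hj h2) (hLge j hj h1)
      simp [this]
  omega

-- ===== VERDICT (by name: the statement is the Claim_ definition above) =====
theorem get_seat_map_stats_spec : Claim_equal_get_seat_map_stats := by
  intro seat_map _
  unfold Spec_get_seat_map_stats get_seat_map_stats get_seat_map_stats_alt
  rw [outerA_eq]
  have hfl : (seat_map.flatMap (fun row => row)) = seat_map.flatten := by
    simp
  have hpw : List.Pairwise (fun a b => a ≤ b)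
      (PySem.List.sorted (seat_map.flatMap (fun row => row)) (fun seat => seat)) :=
    PySem.List.sorted_pairwise _ _
  have hperm : (PySem.List.sorted (seat_map.flatMap (fun row => row)) (fun seat => seat)).Perm
      seat_map.flatten := by
    rw [← hfl]
    exact PySem.List.sorted_perm _ _ _
  simp only [bisect_window_count _ "#" hpw, bisect_window_count _ "L" hpw,
    hperm.count_eq, hperm.length_eq, Prod.ext_iff]
  refine ⟨by ring, by ring, by ring⟩
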